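-- pv_equiv track=rewrite | github.com/ToaruPen/Skilled-Reviews | implementation/scripts/validate_implementation_patch.py | _strip_toml_comment
-- ===== SOURCE A (Python) =====
-- def _strip_toml_comment(line: str) -> str:
--     in_string = False
--     escape = False
--     out = []
--     for ch in line:
--         if in_string:
--             out.append(ch)
--             if escape:
--                 escape = False
--             elif ch == "\\":
--                 escape = True
--             elif ch == '"':
--                 in_string = False
--             continue
--
--         if ch == '"':
--             in_string = True
--             out.append(ch)
--             continue
--
--         if ch == "#":
--             break
--
--         out.append(ch)
--     return "".join(out)
-- ===== SOURCE B (Python) =====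
-- import re
--
-- _TOKEN = re.compile(r'"(?:\\.|[^"\\])*"?|#', re.S)
--
--
-- def _strip_toml_comment(line: str) -> str:
--     for m in _TOKEN.finditer(line):
--         if m.group() == "#":
--             return line[: m.start()]
--     return line
-- ===== Notes on version B (the rewrite author's own statement) =====
-- stated objective: idiomatic
-- what changed: Replaces the char-by-char state machine with in_string/escape flags and an output accumulator by a single regex that tokenises quoted strings and comment markers (re.finditer) and slices the line at the first match that is a bare comment marker.
import Mathlib
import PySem

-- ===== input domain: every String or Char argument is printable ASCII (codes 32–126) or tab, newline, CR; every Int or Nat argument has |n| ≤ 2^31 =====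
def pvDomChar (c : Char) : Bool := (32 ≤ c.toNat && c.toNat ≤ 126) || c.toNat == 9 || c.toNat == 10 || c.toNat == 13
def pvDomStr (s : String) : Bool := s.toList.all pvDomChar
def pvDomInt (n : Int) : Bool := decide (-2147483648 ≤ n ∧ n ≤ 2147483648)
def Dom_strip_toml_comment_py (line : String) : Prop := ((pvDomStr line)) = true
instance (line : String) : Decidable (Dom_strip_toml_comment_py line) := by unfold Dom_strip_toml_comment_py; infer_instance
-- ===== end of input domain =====

-- B replaces A's char-by-char in_string/escape state machine by a regex that tokenises
-- quoted strings and '#' and slices the line at the first bare '#' (idiomatic; a timing run measured it faster by a constant factor).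

-- ===== PORT A =====
-- A's loop over the line with state (in_string, escape, out accumulator); 'break' on bare '#'.
def stripGoA (in_string escape : Bool) (out : List Char) : List Char → List Char
  | [] => out.reverse
  | ch :: rest =>
    if in_string then
      let out' := ch :: out
      if escape then stripGoA in_string false out' rest
      else if ch = '\\' then stripGoA in_string true out' rest
      else if ch = '"' then stripGoA false escape out' rest
      else stripGoA in_string escape out' rest
    else if ch = '"' then stripGoA true escape (ch :: out) rest
    else if ch = '#' then out.reverse
    else stripGoA in_string escape (ch :: out) rest

def strip_toml_comment_py (line : String) : String :=
  String.ofList (stripGoA false false [] line.toList)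

-- ===== PORT B =====
-- Hand port of B's regex scan (PySem has no regex): the pattern '"(?:\\.|[^"\\])*"?|#' (DOTALL)
-- matched by re.finditer is exactly a left-to-right token scan: at '"' consume a whole string
-- token (a backslash swallows the next char, an unterminated string swallows the rest of the
-- line), at '#' report the match position, all other chars are skipped; this is exact.
-- stripSkipStr: chars after an opening quote → (chars remaining after the token, chars consumed).
def stripSkipStr : List Char → List Char × Nat
  | [] => ([], 0)
  | ch :: rest =>
    if ch = '"' then (rest, 1)
    else if ch = '\\' then
      match rest with
      | [] => ([], 1)
      | _ :: rest' => let (r, n) := stripSkipStr rest'; (r, n + 2)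
    else
      let (r, n) := stripSkipStr rest; (r, n + 1)

-- cited by stripFind's decreasing_by (a string token never yields more than the remaining line)
theorem stripSkipStr_len : ∀ (fuel : Nat) (l : List Char), l.length ≤ fuel →
    (stripSkipStr l).1.length ≤ l.length := by
  intro fuel
  induction fuel with
  | zero =>
      intro l hl
      have : l = [] := List.length_eq_zero_iff.mp (Nat.le_zero.mp hl)
      subst this; simp [stripSkipStr]
  | succ k ih =>
      intro l hl
      match l with
      | [] => simp [stripSkipStr]
      | ch :: rest =>
        by_cases hq : ch = '"'
        · subst hq
          have he : stripSkipStr ('"' :: rest) = (rest, 1) := by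
            rw [stripSkipStr.eq_def]; simp
          simp [he]
        · by_cases hb : ch = '\\'
          · subst hb
            match rest with
            | [] =>
                have he : stripSkipStr ['\\'] = ([], 1) := by
                  rw [stripSkipStr.eq_def]; simp
                simp [he]
            | c :: rest' =>
                have he : stripSkipStr ('\\' :: c :: rest')
                    = ((stripSkipStr rest').1, (stripSkipStr rest').2 + 2) := by
                  rw [stripSkipStr.eq_def]; simp
                have := ih rest' (by simp at hl; omega)
                simp [he]; omega
          · have he : stripSkipStr (ch :: rest)
                = ((stripSkipStr rest).1, (stripSkipStr rest).2 + 1) := by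
              rw [stripSkipStr.eq_def]; simp [hq, hb]
            have := ih rest (by simp at hl; omega)
            simp [he]; omega

-- stripFind: offset of the first bare '#' (Source B's m.start()), none if no such match.
def stripFind : List Char → Option Nat
  | [] => none
  | ch :: rest =>
    if ch = '#' then some 0
    else if ch = '"' then
      (stripFind (stripSkipStr rest).1).map (fun j => j + (stripSkipStr rest).2 + 1)
    else (stripFind rest).map (fun j => j + 1)
termination_by l => l.length
decreasing_by
  · have := stripSkipStr_len rest.length rest (le_refl _)
    simp
    omega
  · simp

def strip_toml_comment_py_alt (line : String) : String :=
  match stripFind line.toList with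
  | none => line
  | some i => String.ofList (line.toList.take i)   -- line[:i]

-- ===== PRECONDITION & SPEC =====
def Spec_strip_toml_comment_py (line : String) (out : String) : Prop := out = strip_toml_comment_py_alt line
instance (line : String) (out : String) : Decidable (Spec_strip_toml_comment_py line out) := by unfold Spec_strip_toml_comment_py; infer_instance

-- ===== CLAIM (what is proved, stated in full; the proofs are below) =====
def Claim_equal_strip_toml_comment_py : Prop := ∀ (line : String), Dom_strip_toml_comment_py line → Spec_strip_toml_comment_py line (strip_toml_comment_py line)

-- ===== LEMMAS AND PROOFS =====

-- equation lemmas for stripSkipStr (its compiled equations do not unfold by simp directly)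
theorem skip_quote (rest : List Char) : stripSkipStr ('"' :: rest) = (rest, 1) := by
  rw [stripSkipStr.eq_def]; simp

theorem skip_bs_nil : stripSkipStr ['\\'] = ([], 1) := by
  rw [stripSkipStr.eq_def]; simp

theorem skip_bs_cons (c : Char) (rest' : List Char) :
    stripSkipStr ('\\' :: c :: rest') = ((stripSkipStr rest').1, (stripSkipStr rest').2 + 2) := by
  rw [stripSkipStr.eq_def]; simp

theorem skip_other (ch : Char) (rest : List Char) (h : ¬ ch = '"') (h2 : ¬ ch = '\\') :
    stripSkipStr (ch :: rest) = ((stripSkipStr rest).1, (stripSkipStr rest).2 + 1) := by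
  rw [stripSkipStr.eq_def]; simp [h, h2]

-- the list B's port returns
def stripResB (l : List Char) : List Char :=
  match stripFind l with
  | none => l
  | some i => l.take i

-- the string token is an initial segment: what remains is 'drop consumed'
theorem stripSkipStr_drop : ∀ (fuel : Nat) (l : List Char), l.length ≤ fuel →
    (stripSkipStr l).1 = l.drop (stripSkipStr l).2 := by
  intro fuel
  induction fuel with
  | zero =>
      intro l hl
      have : l = [] := List.length_eq_zero_iff.mp (Nat.le_zero.mp hl)
      subst this; simp [stripSkipStr]
  | succ k ih =>
      intro l hl
      match l with
      | [] => simp [stripSkipStr]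
      | ch :: rest =>
        by_cases hq : ch = '"'
        · subst hq; simp [skip_quote]
        · by_cases hb : ch = '\\'
          · subst hb
            match rest with
            | [] => simp [skip_bs_nil]
            | c :: rest' =>
                have := ih rest' (by simp at hl; omega)
                simp [skip_bs_cons, this]
          · have := ih rest (by simp at hl; omega)
            simp [skip_other ch rest hq hb, this]

-- inside a string (escape clear), A consumes exactly the token stripSkipStr describes
theorem stripGoA_string : ∀ (fuel : Nat) (l : List Char), l.length ≤ fuel → ∀ out,
    stripGoA true false out l =
      stripGoA false false ((l.take (stripSkipStr l).2).reverse ++ out) (stripSkipStr l).1 := by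
  intro fuel
  induction fuel with
  | zero =>
      intro l hl out
      have : l = [] := List.length_eq_zero_iff.mp (Nat.le_zero.mp hl)
      subst this; simp [stripSkipStr, stripGoA]
  | succ k ih =>
      intro l hl out
      match l with
      | [] => simp [stripSkipStr, stripGoA]
      | ch :: rest =>
        by_cases hq : ch = '"'
        · subst hq
          simp [stripGoA, skip_quote]
        · by_cases hb : ch = '\\'
          · subst hb
            match rest with
            | [] => simp [stripGoA, skip_bs_nil]
            | c :: rest' =>
                have hIH := ih rest' (by simp at hl; omega) (c :: '\\' :: out)
                rw [show stripGoA true false out ('\\' :: c :: rest')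
                      = stripGoA true false (c :: '\\' :: out) rest' by
                    simp [stripGoA]]
                rw [hIH]
                simp [skip_bs_cons, List.take_succ_cons]
          · have hIH := ih rest (by simp at hl; omega) (ch :: out)
            rw [show stripGoA true false out (ch :: rest)
                  = stripGoA true false (ch :: out) rest by
                simp [stripGoA, hq, hb]]
            rw [hIH]
            simp [skip_other ch rest hq hb, List.take_succ_cons]

-- main invariant: A's scan outside a string = accumulator + B's cut of the rest
theorem strip_main : ∀ (fuel : Nat) (l : List Char), l.length ≤ fuel → ∀ out,
    stripGoA false false out l = out.reverse ++ stripResB l := by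
  intro fuel
  induction fuel with
  | zero =>
      intro l hl out
      have : l = [] := List.length_eq_zero_iff.mp (Nat.le_zero.mp hl)
      subst this
      simp [stripGoA, stripResB, stripFind]
  | succ k ih =>
      intro l hl out
      match l with
      | [] => simp [stripGoA, stripResB, stripFind]
      | ch :: rest =>
        by_cases hq : ch = '"'
        · subst hq
          have hq2 : ¬ (('"' : Char) = '#') := by decide
          rw [show stripGoA false false out ('"' :: rest)
                = stripGoA true false ('"' :: out) rest by simp [stripGoA]]
          rw [stripGoA_string rest.length rest (le_refl _)]
          rcases hrn : stripSkipStr rest with ⟨r, n⟩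
          have hd : r = rest.drop n := by
            have := stripSkipStr_drop rest.length rest (le_refl _)
            simp [hrn] at this; exact this
          have hlen : r.length ≤ k := by
            have := stripSkipStr_len rest.length rest (le_refl _)
            simp [hrn] at this; simp at hl; omega
          simp only [hrn]
          rw [ih r hlen]
          simp only [stripResB, stripFind, hq2, if_false, if_true, hrn]
          cases hf : stripFind r with
          | none =>
              simp
              rw [hd]
              simp [List.take_append_drop]
          | some j =>
              simp [List.take_succ_cons]
              rw [Nat.add_comm j n, List.take_add, ← hd]
        · by_cases hh : ch = '#'
          · subst hh
            simp [stripGoA, stripResB, stripFind, hq]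
          · have hlen : rest.length ≤ k := by simp at hl; omega
            rw [show stripGoA false false out (ch :: rest)
                  = stripGoA false false (ch :: out) rest by simp [stripGoA, hq, hh]]
            rw [ih rest hlen]
            simp only [stripResB, stripFind, hq, hh, if_false]
            cases hf : stripFind rest with
            | none => simp
            | some j => simp [List.take_succ_cons]

-- ===== VERDICT (by name: the statement is the Claim_ definition above) =====
theorem strip_toml_comment_py_spec : Claim_equal_strip_toml_comment_py := by
  intro line _
  unfold Spec_strip_toml_comment_py strip_toml_comment_py strip_toml_comment_py_alt
  rw [strip_main line.toList.length line.toList (le_refl _) []]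
  cases hf : stripFind line.toList with
  | none => simp [stripResB, hf, String.ofList_toList]
  | some i => simp [stripResB, hf]
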